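-- pv_equiv track=rewrite | github.com/curduman-miruna/Python | Laboratorul_2/9.py | find_obstructed_seats
-- ===== SOURCE A (Python) =====
-- def find_obstructed_seats(matrix):
--     obstructed_seats = []
--     rows = len(matrix)
--     cols = len(matrix[0])
--     for i in range(cols):
--         for j in range(rows):
--             height = matrix[j][i]
--             for k in range(j - 1, -1, -1):
--                 if matrix[k][i] > height:
--                     obstructed_seats.append((j, i))
--                     break
--
--     return obstructed_seats
-- ===== SOURCE B (Python) =====
-- def find_obstructed_seats(matrix):
--     result = []
--     for i, column in enumerate(zip(*matrix)):
--         best = column[0]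
--         for j, h in enumerate(column[1:], 1):
--             if best > h:
--                 result.append((j, i))
--             best = max(best, h)
--     return result
-- ===== Notes on version B (the rewrite author's own statement) =====
-- stated objective: faster
-- what changed: B transposes the matrix with zip(*matrix) and does one top-down pass per column list keeping the running maximum of the seats above, instead of A's index loops that rescan all rows above every seat.
import Mathlib
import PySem

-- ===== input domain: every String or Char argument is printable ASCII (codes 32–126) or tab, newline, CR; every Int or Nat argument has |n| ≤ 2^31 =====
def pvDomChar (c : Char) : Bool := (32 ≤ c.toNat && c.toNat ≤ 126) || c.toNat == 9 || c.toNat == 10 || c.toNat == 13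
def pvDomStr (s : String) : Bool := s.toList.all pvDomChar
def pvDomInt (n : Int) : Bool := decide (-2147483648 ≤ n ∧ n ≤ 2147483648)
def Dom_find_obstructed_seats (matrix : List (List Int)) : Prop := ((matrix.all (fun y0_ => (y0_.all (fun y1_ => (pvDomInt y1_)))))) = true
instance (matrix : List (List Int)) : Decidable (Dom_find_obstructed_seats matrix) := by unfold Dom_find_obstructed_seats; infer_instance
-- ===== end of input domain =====

-- B transposes the matrix (Python zip(*matrix)) and scans each column list recursively with a running
-- maximum instead of A's per-seat upward rescan over row indices; measurably faster, same results.


-- ===== PORT A =====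
-- matrix[j][i]; every access A makes under Pre_ is in range, so the defaults are never read there
def pvCell (matrix : List (List Int)) (j i : Int) : Int :=
  PySem.List.pyGetD (PySem.List.pyGetD matrix j []) i 0

-- the 'for k in range(j-1,-1,-1): … break' loop is the scan '∃ taller seat above', ported as .any over that range
def find_obstructed_seats (matrix : List (List Int)) : List (Int × Int) :=
  let rows : Int := matrix.length
  let cols : Int := (matrix.headD []).length
  (PySem.List.pyRange 0 cols 1).foldl (fun acc i =>
    (PySem.List.pyRange 0 rows 1).foldl (fun acc j =>
      if (PySem.List.pyRange (j - 1) (-1) (-1)).any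
          (fun k => pvCell matrix k i > pvCell matrix j i) then
        acc ++ [(j, i)]
      else acc) acc) []

-- ===== PORT B =====
-- zip(*matrix): truncating transpose, step for step (stop at the first exhausted row), exact for matrix ≠ []
def pvZipGo : List Int → List (List Int) → List (List Int)
  | [], _ => []
  | h :: t, rs =>
      if rs.all (fun r => !r.isEmpty) then
        (h :: rs.map (fun r => r.headD 0)) :: pvZipGo t (rs.map List.tail)
      else []

def pvZipT : List (List Int) → List (List Int)
  | [] => []
  | r :: rs => pvZipGo r rs

-- the inner 'for j, h in enumerate(column[1:], 1)' loop: running maximum down one column list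
def pvScanCol (best j i : Int) : List Int → List (Int × Int)
  | [] => []
  | h :: rest => (if best > h then [(j, i)] else []) ++ pvScanCol (max best h) (j + 1) i rest

def find_obstructed_seats_alt (matrix : List (List Int)) : List (Int × Int) :=
  (PySem.List.enumerate (pvZipT matrix) 0).flatMap (fun p =>
    match p.2 with
    | [] => []            -- unreachable: zip(*matrix) never yields an empty column
    | b :: rest => pvScanCol b 1 p.1 rest)

-- ===== PRECONDITION & SPEC =====
-- Pre_ excludes exactly the inputs where Python A raises IndexError: the empty matrix (matrix[0]),
-- and matrices with a row shorter than row 0 (matrix[j][i] for i < len(matrix[0])).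
def Pre_find_obstructed_seats (matrix : List (List Int)) : Prop :=
  matrix ≠ [] ∧ ∀ row ∈ matrix, (matrix.headD []).length ≤ row.length
instance (matrix : List (List Int)) : Decidable (Pre_find_obstructed_seats matrix) := by
  unfold Pre_find_obstructed_seats; infer_instance

def pvWitness_find_obstructed_seats : List (List Int) := [[1], [0]]

def Spec_find_obstructed_seats (matrix : List (List Int)) (out : List (Int × Int)) : Prop := out = find_obstructed_seats_alt matrix
instance (matrix : List (List Int)) (out : List (Int × Int)) : Decidable (Spec_find_obstructed_seats matrix out) := by unfold Spec_find_obstructed_seats; infer_instance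

-- ===== CLAIM (what is proved, stated in full; the proofs are below) =====
def Claim_equal_find_obstructed_seats : Prop := ∀ (matrix : List (List Int)), Dom_find_obstructed_seats matrix → Pre_find_obstructed_seats matrix → Spec_find_obstructed_seats matrix (find_obstructed_seats matrix)

-- ===== LEMMAS AND PROOFS =====

-- column i of the matrix, as B's transpose produces it (totalised with getD's default)
def pvColFn (matrix : List (List Int)) (i : Nat) : List Int :=
  matrix.map (fun row => row.getD i 0)

-- the per-column result both programs reduce to (b = seat 0, rest = the seats below it)
def pvColBody (c : List Int) (i : Int) : List (Int × Int) :=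
  match c with
  | [] => []
  | b :: rest => pvScanCol b 1 i rest

lemma pv_headD_getD (row : List Int) : row.headD 0 = row.getD 0 0 := by
  cases row <;> simp

lemma pvZipGo_eq (r : List Int) :
    ∀ (rs : List (List Int)), (∀ row ∈ rs, r.length ≤ row.length) →
    pvZipGo r rs = (List.range r.length).map
      (fun i => r.getD i 0 :: rs.map (fun row => row.getD i 0)) := by
  induction r with
  | nil => intro rs _; simp [pvZipGo]
  | cons h t ih =>
      intro rs hlen
      have hne : rs.all (fun r => !r.isEmpty) = true := by
        simp only [List.all_eq_true]
        intro row hrow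
        have := hlen row hrow
        cases row <;> simp_all
      rw [pvZipGo, if_pos hne, List.length_cons, List.range_succ_eq_map, List.map_cons,
        List.map_map]
      congr 1
      · rw [List.getD_cons_zero]
        exact congrArg _ (List.map_congr_left fun a _ => pv_headD_getD a)
      · rw [ih (rs.map List.tail) (by
          intro row' h'
          obtain ⟨row, hrow, rfl⟩ := List.mem_map.mp h'
          have := hlen row hrow
          cases row <;> simp_all)]
        apply List.map_congr_left
        intro i _
        cases rs <;> simp [Function.comp_def, List.getD]

lemma pvZipT_eq (matrix : List (List Int)) (hne : matrix ≠ [])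
    (hlen : ∀ row ∈ matrix, (matrix.headD []).length ≤ row.length) :
    pvZipT matrix = (List.range (matrix.headD []).length).map (pvColFn matrix) := by
  cases matrix with
  | nil => exact absurd rfl hne
  | cons r rs =>
      rw [pvZipT, pvZipGo_eq r rs (fun row h => hlen row (List.mem_cons_of_mem _ h))]
      simp [pvColFn]

-- (l.filter p).map g as a flatMap (the shape both column results reduce to)
lemma pv_filtmap {α β : Type} (l : List α) (p : α → Bool) (g : α → β) :
    (l.filter p).map g = l.flatMap (fun x => if p x then [g x] else []) := by
  induction l with
  | nil => rfl
  | cons x t ih => by_cases h : p x <;> simp [h, ih]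

-- 'some earlier seat is taller' = 'the running maximum of the seats above is taller'
lemma pv_any_prefix_max (cs : List Int) (b x : Int) :
    ∀ (j : Nat), j ≤ cs.length →
    ((List.range (j + 1)).any (fun k => decide (x < (b :: cs).getD k 0)))
      = decide (x < (cs.take j).foldl max b) := by
  intro j
  induction j with
  | zero => intro _; simp
  | succ j ih =>
      intro hj
      have hjl : j < cs.length := by omega
      have ht : cs.take (j + 1) = cs.take j ++ [cs.getD j 0] := by
        rw [List.take_succ_eq_append_getElem hjl, List.getD_eq_getElem]
      rw [List.range_succ, List.any_append, ih (by omega), ht, List.foldl_append]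
      simp only [List.any_cons, List.any_nil, List.getD_cons_succ, List.foldl_cons,
        List.foldl_nil]
      simp [Bool.decide_or]

-- B's recursive column scan, characterised against prefix maxima
lemma pvScanCol_eq (c : List Int) :
    ∀ (b j0 i : Int),
    pvScanCol b j0 i c = (List.range c.length).flatMap
      (fun j => if (c.take j).foldl max b > c.getD j 0 then [(j0 + (j : Int), i)] else []) := by
  induction c with
  | nil => intro b j0 i; simp [pvScanCol]
  | cons h t ih =>
      intro b j0 i
      rw [pvScanCol, ih (max b h) (j0 + 1) i, List.length_cons, List.range_succ_eq_map,
        List.flatMap_cons, List.flatMap_map]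
      congr 1
      · simp
      · apply List.flatMap_congr
        intro j _
        simp only [Nat.succ_eq_add_one, List.take_succ_cons, List.foldl_cons, List.getD_cons_succ]
        have : j0 + ((j : Int) + 1) = j0 + 1 + (j : Int) := by ring
        push_cast
        rw [this]

-- a cell of A, read through B's column list (indices in range)
lemma pv_cell_col (matrix : List (List Int)) (k : Nat) (j : Int)
    (h0 : 0 ≤ j) (h1 : j < (matrix.length : Int)) :
    pvCell matrix j (k : Int) = (pvColFn matrix k).getD j.toNat 0 := by
  have hj : j.toNat < matrix.length := by omega
  rw [pvCell, PySem.List.pyGetD_eq_getElem matrix [] h0 h1, PySem.List.pyGetD_natCast, pvColFn,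
    List.getD_eq_getElem (matrix.map (fun row => row.getD k 0)) 0 (n := j.toNat)
      (by simpa using hj),
    List.getElem_map]

-- A's per-column pass equals B's column body
lemma pv_colA (matrix : List (List Int)) (k : Nat) :
    ((PySem.List.pyRange 0 (matrix.length : Int) 1).filter
        (fun j => (PySem.List.pyRange (j - 1) (-1) (-1)).any
          (fun kk => pvCell matrix kk (k : Int) > pvCell matrix j (k : Int)))).map
      (fun j => (j, (k : Int)))
    = pvColBody (pvColFn matrix k) (k : Int) := by
  have hlen : (pvColFn matrix k).length = matrix.length := List.length_map ..
  -- step 1: the filter's predicate, read through B's column list over Nat indices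
  have hpred : ∀ (jn : Nat), jn < matrix.length →
      ((PySem.List.pyRange ((jn : Int) - 1) (-1) (-1)).any
          (fun kk => pvCell matrix kk (k : Int) > pvCell matrix (jn : Int) (k : Int)))
        = ((List.range jn).any
          (fun kkn => decide ((pvColFn matrix k).getD jn 0 < (pvColFn matrix k).getD kkn 0))) := by
    intro jn hjn
    rw [PySem.List.pyRange_neg_one_eq_reverse, show (-1 : Int) + 1 = 0 by norm_num,
      show (jn : Int) - 1 + 1 = (jn : Int) by ring, List.any_reverse,
      PySem.List.pyRange_zero_nat jn, List.any_map]
    apply PySem.List.any_congr_mem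
    intro kkn hkk
    have hkk' : kkn < jn := List.mem_range.mp hkk
    simp only [Function.comp, gt_iff_lt]
    rw [pv_cell_col matrix k (jn : Int) (by positivity) (by exact_mod_cast hjn),
      pv_cell_col matrix k (kkn : Int) (by positivity)
        (by exact_mod_cast (show kkn < matrix.length by omega)),
      Int.toNat_natCast, Int.toNat_natCast]
  -- step 2: Nat-range form of A's column pass
  rw [PySem.List.pyRange_zero_nat matrix.length, List.filter_map, List.map_map]
  rw [List.filter_congr (fun jn hjn => by
    simp only [Function.comp]
    exact hpred jn (List.mem_range.mp hjn))]
  -- step 3: split on the column and compare with B's scan, prefix-max against prefix-max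
  rcases hc : pvColFn matrix k with _ | ⟨b, rest⟩
  · have h0 : matrix.length = 0 := by rw [← hlen, hc]; rfl
    rw [h0]
    simp [pvColBody]
  · have hn : matrix.length = rest.length + 1 := by rw [← hlen, hc]; rfl
    simp only [Function.comp_def]
    rw [hn, pvColBody, pvScanCol_eq, pv_filtmap (List.range (rest.length + 1)) _
      (fun jn => ((jn : Int), (k : Int)))]
    rw [List.range_succ_eq_map, List.flatMap_cons, List.flatMap_map]
    have hz : (List.range 0).any
        (fun kkn => decide (List.getD (b :: rest) 0 0 < List.getD (b :: rest) kkn 0)) = false := by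
      simp
    rw [hz]
    simp only [if_neg Bool.false_ne_true, List.nil_append]
    apply List.flatMap_congr
    intro j hj
    have hjr : j < rest.length := List.mem_range.mp hj
    rw [Nat.succ_eq_add_one, List.getD_cons_succ,
      pv_any_prefix_max rest b (rest.getD j 0) j (by omega)]
    by_cases hcond : rest.getD j 0 < (rest.take j).foldl max b
    · rw [if_pos (by simpa using hcond), if_pos (by simpa using hcond)]
      norm_num
      omega
    · rw [if_neg (by simpa using hcond), if_neg (by simpa using hcond)]

-- enumerate-then-flatMap over a range of columns, as a plain flatMap over the range
lemma pv_enum_flat (f : Nat → List Int) (g : Int × List Int → List (Int × Int)) :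
    ∀ (n : Nat), (PySem.List.enumerate ((List.range n).map f) 0).flatMap g
      = (List.range n).flatMap (fun (k : Nat) => g ((k : Int), f k)) := by
  intro n
  induction n with
  | zero => rfl
  | succ n ih =>
      rw [List.range_succ, List.map_append, PySem.List.enumerate_append, List.flatMap_append,
        List.flatMap_append, ih]
      simp [PySem.List.enumerate_cons]

-- ===== VERDICT (by name: the statement is the Claim_ definition above) =====
theorem find_obstructed_seats_spec : Claim_equal_find_obstructed_seats := by
  intro matrix _ hpre
  obtain ⟨hne, hlen⟩ := hpre
  unfold Spec_find_obstructed_seats find_obstructed_seats find_obstructed_seats_alt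
  rw [pvZipT_eq matrix hne hlen]
  rw [pv_enum_flat (pvColFn matrix) _ ((matrix.headD []).length)]
  have houter : ∀ (acc : List (Int × Int)),
      (PySem.List.pyRange 0 ((matrix.headD []).length : Int) 1).foldl (fun acc i =>
        (PySem.List.pyRange 0 (matrix.length : Int) 1).foldl (fun acc j =>
          if (PySem.List.pyRange (j - 1) (-1) (-1)).any
              (fun kk => pvCell matrix kk i > pvCell matrix j i) then
            acc ++ [(j, i)]
          else acc) acc) acc
      = acc ++ (PySem.List.pyRange 0 ((matrix.headD []).length : Int) 1).flatMap (fun i =>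
          ((PySem.List.pyRange 0 (matrix.length : Int) 1).filter
            (fun j => (PySem.List.pyRange (j - 1) (-1) (-1)).any
              (fun kk => pvCell matrix kk i > pvCell matrix j i))).map (fun j => (j, i))) := by
    intro acc
    rw [← PySem.List.foldl_append_eq_flatMap]
    apply PySem.List.foldl_congr_mem
    intro a i _
    exact PySem.List.foldl_append_if _ _ _ _
  rw [houter, List.nil_append, PySem.List.pyRange_zero_nat (matrix.headD []).length, List.flatMap_map]
  apply List.flatMap_congr
  intro k _
  simpa using pv_colA matrix k
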